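-- pv_equiv track=rewrite | github.com/matejostadal/use_of_prime_numbers | impl/primality_testing.py | poly_mod_mul
-- ===== SOURCE A (Python) =====
-- def poly_mod_mul(poly_1, poly_2, modulus_1, modulus_2):
--     """
--     Performs a polynomial modular exponentiation of given polynomials and moduli.
--
--     Args:
--         poly_1 (list): Coefficients representing the first polynomial.
--         poly_2 (list): Coefficients representing the second polynomial.
--         modulus_1 (int): Represents the first modulus. (n)
--         modulus_2 (int): Represents the first modulus. (X^r - 1)
--
--     Returns:
--         list: Coefficients of the result of modular exponentiation.
--     """
--     result_length = len(poly_1) + len(poly_2) - 1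
--
--     result_poly = [0] * result_length
--
--     for i in range(len(poly_1)):
--         for j in range(len(poly_2)):
--             result_poly[(i + j) % modulus_2] += poly_1[i] * poly_2[j]
--             result_poly[(i + j) % modulus_2] = (
--                 result_poly[(i + j) % modulus_2] % modulus_1
--             )
--
--     #
--     # result_poly = result_poly[: -(len(result_poly) - modulus_2)]
--
--     for _ in range(modulus_2, len(result_poly)):
--         result_poly = result_poly[:-1]
--
--     return result_poly
-- ===== SOURCE B (Python) =====
-- def poly_mod_mul(poly_1, poly_2, modulus_1, modulus_2):
--     """Same result as A: wrapped (mod X^r - 1) polynomial product with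
--     coefficients reduced mod modulus_1, computed bucket-wise by diagonal
--     sums instead of A's per-term scatter/trim."""
--     n1, n2 = len(poly_1), len(poly_2)
--     full_len = n1 + n2 - 1
--     result = [0] * min(full_len, modulus_2)
--     if n1 and n2:
--         for k in range(full_len):
--             s = 0
--             for i in range(max(0, k - n2 + 1), min(k + 1, n1)):
--                 s += poly_1[i] * poly_2[k - i]
--             b = k % modulus_2
--             result[b] = (result[b] + s) % modulus_1
--     return result
-- ===== Notes on version B (the rewrite author's own statement) =====
-- stated objective: faster
-- what changed: B replaces A's per-term scatter (a mod-reduction after every single product, then a pop-one-at-a-time trim loop that recopies the list) by a diagonal-sum convolution: it allocates the final min(len1+len2-1, modulus_2) buckets up front, computes each convolution coefficient as one inner diagonal sum, and folds it into its bucket with a single mod per diagonal.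
-- outside the precondition, e.g. on poly_mod_mul([1], [1], 5, -2): A returns [], B raises IndexError
import Mathlib
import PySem

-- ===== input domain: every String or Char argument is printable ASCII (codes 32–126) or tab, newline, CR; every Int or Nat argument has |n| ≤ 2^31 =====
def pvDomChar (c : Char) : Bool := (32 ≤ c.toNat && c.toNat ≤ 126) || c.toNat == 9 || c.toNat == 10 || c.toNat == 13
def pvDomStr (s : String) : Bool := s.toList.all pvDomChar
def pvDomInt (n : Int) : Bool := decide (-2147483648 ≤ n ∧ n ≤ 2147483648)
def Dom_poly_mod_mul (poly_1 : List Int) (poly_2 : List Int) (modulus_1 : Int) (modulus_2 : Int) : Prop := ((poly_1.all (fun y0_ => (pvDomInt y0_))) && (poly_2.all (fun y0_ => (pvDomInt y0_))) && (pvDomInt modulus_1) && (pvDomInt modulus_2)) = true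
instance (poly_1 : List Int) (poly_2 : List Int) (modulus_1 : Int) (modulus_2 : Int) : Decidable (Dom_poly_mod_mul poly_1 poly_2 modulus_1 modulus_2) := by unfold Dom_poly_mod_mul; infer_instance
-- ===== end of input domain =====

-- B computes the same wrapped polynomial product by diagonal sums folded into the
-- min(len1+len2-1, modulus_2) buckets (one mod per diagonal), instead of A's
-- per-term scatter with a mod after every product followed by a pop-one-at-a-time trim loop.

-- ===== PORT A =====
def poly_mod_mul (poly_1 : List Int) (poly_2 : List Int) (modulus_1 : Int) (modulus_2 : Int) : List Int :=
  let result_length : Int := PySem.List.len poly_1 + PySem.List.len poly_2 - 1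
  let result_poly : List Int := List.replicate result_length.toNat 0
  let result_poly : List Int :=
    (PySem.List.pyRange 0 (PySem.List.len poly_1) 1).foldl (fun acc i =>
      (PySem.List.pyRange 0 (PySem.List.len poly_2) 1).foldl (fun acc j =>
        let idx := PySem.Int.mod (i + j) modulus_2
        -- result_poly[(i+j) % modulus_2] += poly_1[i] * poly_2[j]
        let acc := PySem.List.pySetD acc idx
          (PySem.List.pyGetD acc idx 0 + PySem.List.pyGetD poly_1 i 0 * PySem.List.pyGetD poly_2 j 0)
        -- result_poly[(i+j) % modulus_2] = result_poly[(i+j) % modulus_2] % modulus_1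
        PySem.List.pySetD acc idx (PySem.Int.mod (PySem.List.pyGetD acc idx 0) modulus_1)) acc) result_poly
  -- for _ in range(modulus_2, len(result_poly)): result_poly = result_poly[:-1]
  (PySem.List.pyRange modulus_2 (PySem.List.len result_poly) 1).foldl
    (fun acc _ => PySem.List.slice acc none (some (-1))) result_poly

-- ===== PORT B =====
def poly_mod_mul_alt (poly_1 : List Int) (poly_2 : List Int) (modulus_1 : Int) (modulus_2 : Int) : List Int :=
  let n1 : Int := PySem.List.len poly_1
  let n2 : Int := PySem.List.len poly_2
  let full_len : Int := n1 + n2 - 1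
  let result : List Int := List.replicate (min full_len modulus_2).toNat 0
  if n1 ≠ 0 ∧ n2 ≠ 0 then
    (PySem.List.pyRange 0 full_len 1).foldl (fun res k =>
      let s : Int := (PySem.List.pyRange (max 0 (k - n2 + 1)) (min (k + 1) n1) 1).foldl
        (fun s i => s + PySem.List.pyGetD poly_1 i 0 * PySem.List.pyGetD poly_2 (k - i) 0) 0
      let b := PySem.Int.mod k modulus_2
      PySem.List.pySetD res b (PySem.Int.mod (PySem.List.pyGetD res b 0 + s) modulus_1)) result
  else result

-- ===== PRECONDITION & SPEC =====
-- Pre_ restricts to the natural domain modulus_2 > 0 (the degree r of X^r - 1) and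
-- modulus_1 ≠ 0 whenever a product is actually reduced: with both polynomials nonempty
-- A raises ZeroDivisionError on modulus_2 = 0 or modulus_1 = 0, and for modulus_2 < 0
-- A returns [] through negative-index wraparound and over-trimming while B raises IndexError.
def Pre_poly_mod_mul (poly_1 : List Int) (poly_2 : List Int) (modulus_1 : Int) (modulus_2 : Int) : Prop :=
  poly_1 = [] ∨ poly_2 = [] ∨ (0 < modulus_2 ∧ modulus_1 ≠ 0)
instance (poly_1 : List Int) (poly_2 : List Int) (modulus_1 : Int) (modulus_2 : Int) : Decidable (Pre_poly_mod_mul poly_1 poly_2 modulus_1 modulus_2) := by unfold Pre_poly_mod_mul; infer_instance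
def pvWitness_poly_mod_mul : List Int × List Int × Int × Int := ([1, 2], [3, 4], 5, 3)

def Spec_poly_mod_mul (poly_1 : List Int) (poly_2 : List Int) (modulus_1 : Int) (modulus_2 : Int) (out : List Int) : Prop := out = poly_mod_mul_alt poly_1 poly_2 modulus_1 modulus_2
instance (poly_1 : List Int) (poly_2 : List Int) (modulus_1 : Int) (modulus_2 : Int) (out : List Int) : Decidable (Spec_poly_mod_mul poly_1 poly_2 modulus_1 modulus_2 out) := by unfold Spec_poly_mod_mul; infer_instance

-- ===== CLAIM (what is proved, stated in full; the proofs are below) =====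
def Claim_equal_poly_mod_mul : Prop := ∀ (poly_1 : List Int) (poly_2 : List Int) (modulus_1 : Int) (modulus_2 : Int), Dom_poly_mod_mul poly_1 poly_2 modulus_1 modulus_2 → Pre_poly_mod_mul poly_1 poly_2 modulus_1 modulus_2 → Spec_poly_mod_mul poly_1 poly_2 modulus_1 modulus_2 (poly_mod_mul poly_1 poly_2 modulus_1 modulus_2)

-- ===== LEMMAS AND PROOFS =====

-- The bucket-update step both fills reduce to.
def pvStep (m : Int) (acc : List Int) (p : Nat × Int) : List Int :=
  acc.set p.1 (PySem.Int.mod (acc.getD p.1 0 + p.2) m)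

def pvTerm (p1 p2 : List Int) (i j : Nat) : Int := p1.getD i 0 * p2.getD j 0

-- A's update list: one (bucket, term) pair per (i, j).
def pvPairsA (p1 p2 : List Int) (r : Nat) : List (Nat × Int) :=
  (List.range p1.length).flatMap (fun i =>
    (List.range p2.length).map (fun j => ((i + j) % r, pvTerm p1 p2 i j)))

-- B's diagonal sums and update list: one (bucket, diagonal-sum) pair per k.
def pvConv (p1 p2 : List Int) (k : Nat) : Int :=
  ∑ i ∈ Finset.range p1.length, if i ≤ k ∧ k - i < p2.length then pvTerm p1 p2 i (k - i) else 0

def pvPairsB (p1 p2 : List Int) (r : Nat) : List (Nat × Int) :=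
  (List.range (p1.length + p2.length - 1)).map (fun k => (k % r, pvConv p1 p2 k))

-- The total contribution to bucket b.
def pvS (p1 p2 : List Int) (r b : Nat) : Int :=
  ∑ i ∈ Finset.range p1.length, ∑ j ∈ Finset.range p2.length,
    if (i + j) % r = b then pvTerm p1 p2 i j else 0

theorem pvStep_length (m : Int) (acc : List Int) (p : Nat × Int) :
    (pvStep m acc p).length = acc.length := by simp [pvStep]

theorem pvFoldl_pvStep_length (m : Int) (ps : List (Nat × Int)) (init : List Int) :
    (ps.foldl (pvStep m) init).length = init.length := by
  induction ps generalizing init with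
  | nil => rfl
  | cons p ps ih => simp [List.foldl_cons, ih, pvStep_length]

theorem pvMod_absorb (a c m : Int) :
    PySem.Int.mod (PySem.Int.mod a m + c) m = PySem.Int.mod (a + c) m := by
  simp [PySem.Int.mod]

theorem pvBucket (m : Int) (ps : List (Nat × Int)) (init : List Int) (b : Nat)
    (hps : ∀ p ∈ ps, p.1 < init.length) :
    (ps.foldl (pvStep m) init).getD b 0 =
      if (ps.filter (fun p => p.1 == b)) = [] then init.getD b 0
      else PySem.Int.mod (init.getD b 0 + ((ps.filter (fun p => p.1 == b)).map Prod.snd).sum) m := by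
  induction ps generalizing init with
  | nil => simp
  | cons p ps ih =>
    obtain ⟨a, t⟩ := p
    have hlen : a < init.length := hps (a, t) (by simp)
    have hset : ∀ q ∈ ps, q.1 < (pvStep m init (a, t)).length := by
      intro q hq; rw [pvStep_length]; exact hps q (by simp [hq])
    rw [List.foldl_cons, ih _ hset, List.filter_cons]
    by_cases hb : a = b
    · subst hb
      have hgetself : (pvStep m init (a, t)).getD a 0 = PySem.Int.mod (init.getD a 0 + t) m := by
        simp [pvStep, List.getD, hlen]
      simp only [beq_self_eq_true, if_pos]
      rw [hgetself]
      by_cases hnil : (ps.filter (fun q => q.1 == a)) = []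
      · rw [hnil]
        simp
      · rw [if_neg hnil, if_neg (by simp)]
        rw [pvMod_absorb, List.map_cons, List.sum_cons, add_assoc]
    · have hgetne : (pvStep m init (a, t)).getD b 0 = init.getD b 0 := by
        simp [pvStep, List.getD, List.getElem?_set_ne (fun h : a = b => hb h)]
      rw [hgetne, if_neg (by simp [hb] : ¬((a == b) = true))]

-- A's two writes at the same index are one pvStep.
theorem pvStepA_eq (m : Int) (acc : List Int) (n : Nat) (t : Int) :
    (let acc' := acc.set n (acc.getD n 0 + t);
     acc'.set n (PySem.Int.mod (acc'.getD n 0) m)) = pvStep m acc (n, t) := by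
  by_cases h : n < acc.length
  · simp [pvStep, List.getD, h, List.set_set]
  · have h' : acc.length ≤ n := Nat.le_of_not_lt h
    simp [pvStep, List.set_eq_of_length_le h']

theorem pvIdxCast (i j r : Nat) :
    PySem.Int.mod ((i:Int) + (j:Int)) (r:Int) = (((i + j) % r : Nat) : Int) := by
  rw [show ((i:Int)+(j:Int)) = ((i+j:Nat):Int) by push_cast; ring]
  exact PySem.Int.mod_natCast _ _

-- A's fill loop is the pvStep fold over pvPairsA.
theorem pvFillA (p1 p2 : List Int) (m1 : Int) (r : Nat) (init : List Int) :
    (PySem.List.pyRange 0 ((p1.length:Int)) 1).foldl (fun acc i =>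
      (PySem.List.pyRange 0 ((p2.length:Int)) 1).foldl (fun acc j =>
        let idx := PySem.Int.mod (i + j) (r:Int)
        let acc := PySem.List.pySetD acc idx
          (PySem.List.pyGetD acc idx 0 + PySem.List.pyGetD p1 i 0 * PySem.List.pyGetD p2 j 0)
        PySem.List.pySetD acc idx (PySem.Int.mod (PySem.List.pyGetD acc idx 0) m1)) acc) init
    = (pvPairsA p1 p2 r).foldl (pvStep m1) init := by
  rw [pvPairsA, List.foldl_flatMap]
  rw [PySem.List.pyRange_zero_natCast, PySem.List.pyRange_zero_natCast, List.foldl_map]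
  apply PySem.List.foldl_congr_mem
  intro acc0 i _
  rw [List.foldl_map, List.foldl_map]
  apply PySem.List.foldl_congr_mem
  intro acc j _
  simp only [pvIdxCast, PySem.List.pySetD_natCast, PySem.List.pyGetD_natCast]
  have := pvStepA_eq m1 acc ((i + j) % r) (pvTerm p1 p2 i j)
  simp only [pvTerm] at this
  simpa using this

-- B's inner loop computes the diagonal sum pvConv.
theorem pvConvEq (p1 p2 : List Int) (k : Nat) :
    (PySem.List.pyRange (max 0 ((k:Int) - (p2.length:Int) + 1)) (min ((k:Int) + 1) (p1.length:Int)) 1).foldl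
      (fun s i => s + PySem.List.pyGetD p1 i 0 * PySem.List.pyGetD p2 ((k:Int) - i) 0) 0
    = pvConv p1 p2 k := by
  have hlo : max 0 ((k:Int) - (p2.length:Int) + 1) = ((k + 1 - p2.length : Nat) : Int) := by
    omega
  have hhi : min ((k:Int) + 1) (p1.length:Int) = ((min (k+1) p1.length : Nat) : Int) := by
    push_cast; omega
  rw [hlo, hhi, PySem.List.foldl_add, PySem.List.pyRange_one]
  set lon := k + 1 - p2.length with hlon
  set hin := min (k+1) p1.length with hhin
  have hW : (((hin:Int)) - (lon:Int)).toNat = hin - lon := by omega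
  rw [hW, List.map_map]
  simp only [Function.comp_def]
  have hmap : ∀ t ∈ List.range (hin - lon),
      PySem.List.pyGetD p1 ((lon:Int) + (t:Int)) 0 * PySem.List.pyGetD p2 ((k:Int) - ((lon:Int) + (t:Int))) 0
        = pvTerm p1 p2 (lon + t) (k - (lon + t)) := by
    intro t ht
    simp only [List.mem_range] at ht
    have h1 : (lon:Int) + (t:Int) = ((lon + t : Nat) : Int) := by push_cast; ring
    have h2 : (k:Int) - ((lon + t : Nat) : Int) = ((k - (lon + t) : Nat) : Int) := by
      have : lon + t ≤ k := by omega
      push_cast; omega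
    rw [h1, h2, PySem.List.pyGetD_natCast, PySem.List.pyGetD_natCast, pvTerm]
  rw [List.map_congr_left hmap]
  have hbridge : (List.map (fun t => pvTerm p1 p2 (lon + t) (k - (lon + t))) (List.range (hin - lon))).sum
      = ∑ t ∈ Finset.range (hin - lon), pvTerm p1 p2 (lon + t) (k - (lon + t)) := rfl
  rw [zero_add, hbridge]
  have hIco : (∑ i ∈ Finset.Ico lon hin, pvTerm p1 p2 i (k - i))
      = ∑ t ∈ Finset.range (hin - lon), pvTerm p1 p2 (lon + t) (k - (lon + t)) :=
    Finset.sum_Ico_eq_sum_range (fun i => pvTerm p1 p2 i (k - i)) lon hin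
  rw [← hIco, pvConv, ← Finset.sum_filter]
  have hset : Finset.filter (fun i => i ≤ k ∧ k - i < p2.length) (Finset.range p1.length)
      = Finset.Ico lon hin := by
    ext i
    simp only [Finset.mem_filter, Finset.mem_range, Finset.mem_Ico]
    omega
  rw [hset]

-- B's main loop is the pvStep fold over pvPairsB.
theorem pvFillB (p1 p2 : List Int) (m1 : Int) (r : Nat) (init : List Int) (hn1 : 0 < p1.length) :
    (PySem.List.pyRange 0 ((p1.length:Int) + (p2.length:Int) - 1) 1).foldl (fun res k =>
      let s : Int := (PySem.List.pyRange (max 0 (k - (p2.length:Int) + 1)) (min (k + 1) (p1.length:Int)) 1).foldl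
        (fun s i => s + PySem.List.pyGetD p1 i 0 * PySem.List.pyGetD p2 (k - i) 0) 0
      let b := PySem.Int.mod k (r:Int)
      PySem.List.pySetD res b (PySem.Int.mod (PySem.List.pyGetD res b 0 + s) m1)) init
    = (pvPairsB p1 p2 r).foldl (pvStep m1) init := by
  have hcast : ((p1.length:Int) + (p2.length:Int) - 1) = ((p1.length + p2.length - 1 : Nat) : Int) := by
    omega
  rw [hcast, PySem.List.pyRange_zero_natCast, List.foldl_map, pvPairsB, List.foldl_map]
  apply PySem.List.foldl_congr_mem
  intro res k _
  simp only [pvConvEq]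
  rw [show PySem.Int.mod (k:Int) (r:Int) = ((k % r : Nat):Int) from PySem.Int.mod_natCast k r]
  simp only [PySem.List.pySetD_natCast, PySem.List.pyGetD_natCast]
  rfl

-- the trim loop 'for _ in range(...): xs = xs[:-1]' pops one element per iteration
theorem pvTrim (l : List Int) (xs : List Int) :
    l.foldl (fun acc _ => PySem.List.slice acc none (some (-1))) xs
      = xs.take (xs.length - l.length) := by
  induction l generalizing xs with
  | nil => simp
  | cons a l ih =>
    rw [List.foldl_cons, PySem.List.slice_to_neg_one, ih, List.dropLast_eq_take, List.take_take,
        List.length_take]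
    congr 1
    simp only [List.length_cons]
    omega

theorem pvFilterSum (l : List (Nat × Int)) (b : Nat) :
    ((l.filter (fun p => p.1 == b)).map Prod.snd).sum
      = (l.map (fun p => if p.1 = b then p.2 else 0)).sum := by
  induction l with
  | nil => simp
  | cons p l ih =>
    by_cases h : p.1 = b <;> simp [h, ih]

theorem pvSumFlat (l : List Nat) (g : Nat → List Int) :
    (l.flatMap g).sum = (l.map fun a => (g a).sum).sum := by
  induction l with
  | nil => rfl
  | cons a l ih => simp [List.flatMap_cons, List.sum_append, ih]

theorem pvSumA (p1 p2 : List Int) (r b : Nat) :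
    (((pvPairsA p1 p2 r).filter (fun p => p.1 == b)).map Prod.snd).sum = pvS p1 p2 r b := by
  rw [pvFilterSum, pvPairsA, List.map_flatMap, pvSumFlat]
  simp only [List.map_map]
  rfl

theorem pvSumB (p1 p2 : List Int) (r b : Nat) :
    (((pvPairsB p1 p2 r).filter (fun p => p.1 == b)).map Prod.snd).sum
      = ∑ k ∈ Finset.range (p1.length + p2.length - 1),
          if k % r = b then pvConv p1 p2 k else 0 := by
  rw [pvFilterSum, pvPairsB, List.map_map]
  rfl

-- B's per-diagonal sums group A's per-term contributions.
theorem pvSumBS (p1 p2 : List Int) (r b : Nat) :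
    (∑ k ∈ Finset.range (p1.length + p2.length - 1),
      if k % r = b then pvConv p1 p2 k else 0) = pvS p1 p2 r b := by
  have h1 : ∀ k ∈ Finset.range (p1.length + p2.length - 1),
      (if k % r = b then pvConv p1 p2 k else 0)
        = ∑ i ∈ Finset.range p1.length,
            if k % r = b ∧ i ≤ k ∧ k - i < p2.length then pvTerm p1 p2 i (k - i) else 0 := by
    intro k _
    by_cases h : k % r = b
    · simp only [h, if_true, pvConv, true_and]
    · simp [h]
  rw [Finset.sum_congr rfl h1, Finset.sum_comm]
  apply Finset.sum_congr rfl
  intro i hi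
  simp only [Finset.mem_range] at hi
  have hsub : Finset.Ico i (i + p2.length) ⊆ Finset.range (p1.length + p2.length - 1) := by
    intro x hx
    simp only [Finset.mem_Ico] at hx
    simp only [Finset.mem_range]
    omega
  have hzero : ∀ k ∈ Finset.range (p1.length + p2.length - 1), k ∉ Finset.Ico i (i + p2.length) →
      (if k % r = b ∧ i ≤ k ∧ k - i < p2.length then pvTerm p1 p2 i (k - i) else 0) = 0 := by
    intro k _ hk
    simp only [Finset.mem_Ico, not_and, not_lt] at hk
    rw [if_neg]
    rintro ⟨-, h2, h3⟩
    omega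
  rw [← Finset.sum_subset hsub hzero]
  have hIco := Finset.sum_Ico_eq_sum_range
    (fun k => if k % r = b ∧ i ≤ k ∧ k - i < p2.length then pvTerm p1 p2 i (k - i) else 0) i (i + p2.length)
  rw [hIco]
  have : i + p2.length - i = p2.length := by omega
  rw [this]
  apply Finset.sum_congr rfl
  intro j hj
  simp only [Finset.mem_range] at hj
  have e1 : i + j - i = j := by omega
  by_cases h : (i + j) % r = b
  · rw [if_pos (by exact ⟨h, by omega, by omega⟩), if_pos h, e1]
  · rw [if_neg (by rintro ⟨hh, -, -⟩; exact h hh), if_neg h]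

theorem pvReplicate_getD (n b : Nat) : (List.replicate n (0:Int)).getD b 0 = 0 := by
  by_cases h : b < n
  · simp [List.getD, h]
  · simp [List.getD, h]

-- bucket b is touched at least once on each side
theorem pvHitA (p1 p2 : List Int) (r b : Nat) (hn1 : 0 < p1.length) (hn2 : 0 < p2.length)
    (hbr : b < r) (hbL : b < p1.length + p2.length - 1) :
    (pvPairsA p1 p2 r).filter (fun p => p.1 == b) ≠ [] := by
  intro hnil
  have hmem : ((min b (p1.length - 1) + (b - min b (p1.length - 1))) % r,
      pvTerm p1 p2 (min b (p1.length - 1)) (b - min b (p1.length - 1))) ∈ pvPairsA p1 p2 r := by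
    rw [pvPairsA, List.mem_flatMap]
    refine ⟨min b (p1.length - 1), by simp [List.mem_range]; omega, ?_⟩
    rw [List.mem_map]
    exact ⟨b - min b (p1.length - 1), by simp [List.mem_range]; omega, rfl⟩
  have := List.filter_eq_nil_iff.mp hnil _ hmem
  simp only [beq_iff_eq] at this
  apply this
  have : min b (p1.length - 1) + (b - min b (p1.length - 1)) = b := by omega
  rw [this, Nat.mod_eq_of_lt hbr]

theorem pvHitB (p1 p2 : List Int) (r b : Nat) (hbr : b < r) (hbL : b < p1.length + p2.length - 1) :
    (pvPairsB p1 p2 r).filter (fun p => p.1 == b) ≠ [] := by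
  intro hnil
  have hmem : ((b % r, pvConv p1 p2 b)) ∈ pvPairsB p1 p2 r := by
    rw [pvPairsB, List.mem_map]
    exact ⟨b, by simp [List.mem_range]; omega, rfl⟩
  have := List.filter_eq_nil_iff.mp hnil _ hmem
  simp only [beq_iff_eq] at this
  exact this (Nat.mod_eq_of_lt hbr)

-- bucket indices stay below the respective array lengths
theorem pvPairsA_lt (p1 p2 : List Int) (r : Nat) (p : Nat × Int) (hp : p ∈ pvPairsA p1 p2 r) :
    p.1 < p1.length + p2.length - 1 := by
  rw [pvPairsA, List.mem_flatMap] at hp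
  obtain ⟨i, hi, hp⟩ := hp
  rw [List.mem_map] at hp
  obtain ⟨j, hj, rfl⟩ := hp
  simp only [List.mem_range] at hi hj
  have := Nat.mod_le (i + j) r
  omega

theorem pvPairsB_lt (p1 p2 : List Int) (r : Nat) (hr : 0 < r) (p : Nat × Int)
    (hp : p ∈ pvPairsB p1 p2 r) : p.1 < min (p1.length + p2.length - 1) r := by
  rw [pvPairsB, List.mem_map] at hp
  obtain ⟨k, hk, rfl⟩ := hp
  simp only [List.mem_range] at hk
  have h1 : k % r < r := Nat.mod_lt _ hr
  have h2 : k % r ≤ k := Nat.mod_le k r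
  omega

theorem poly_mod_mul_spec : Claim_equal_poly_mod_mul := by
  unfold Claim_equal_poly_mod_mul
  intro p1 p2 m1 m2 _ hpre
  unfold Spec_poly_mod_mul
  by_cases hemp : p1.length = 0 ∨ p2.length = 0
  · -- a polynomial is empty: no products, both sides are a trimmed zero list
    simp only [poly_mod_mul, poly_mod_mul_alt, PySem.List.len_eq]
    have hfill : (PySem.List.pyRange 0 ((p1.length:Int)) 1).foldl (fun acc i =>
        (PySem.List.pyRange 0 ((p2.length:Int)) 1).foldl (fun acc j =>
          let idx := PySem.Int.mod (i + j) m2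
          let acc := PySem.List.pySetD acc idx
            (PySem.List.pyGetD acc idx 0 + PySem.List.pyGetD p1 i 0 * PySem.List.pyGetD p2 j 0)
          PySem.List.pySetD acc idx (PySem.Int.mod (PySem.List.pyGetD acc idx 0) m1)) acc)
        (List.replicate ((p1.length:Int) + (p2.length:Int) - 1).toNat 0)
        = List.replicate ((p1.length:Int) + (p2.length:Int) - 1).toNat 0 := by
      rcases hemp with h | h
      · simp [h, PySem.List.pyRange_zero_natCast]
      · simp [h, PySem.List.pyRange_zero_natCast, List.foldl_fixed]
    rw [hfill, pvTrim, List.length_replicate, PySem.List.length_pyRange_one, List.take_replicate]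
    rw [if_neg (by omega)]
    congr 1
    omega
  · -- both polynomials nonempty: Pre_ gives 0 < modulus_2 and modulus_1 ≠ 0
    rw [not_or] at hemp
    obtain ⟨hn1, hn2⟩ := hemp
    have hn1' : 0 < p1.length := Nat.pos_of_ne_zero hn1
    have hn2' : 0 < p2.length := Nat.pos_of_ne_zero hn2
    have hpre' : 0 < m2 ∧ m1 ≠ 0 := by
      rcases hpre with h | h | h
      · exact absurd (by rw [h]; rfl) hn1
      · exact absurd (by rw [h]; rfl) hn2
      · exact h
    obtain ⟨hm2, hm1⟩ := hpre'
    obtain ⟨r, rfl⟩ : ∃ r : Nat, m2 = (r:Int) := ⟨m2.toNat, (Int.toNat_of_nonneg hm2.le).symm⟩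
    have hr : 0 < r := by exact_mod_cast hm2
    simp only [poly_mod_mul, poly_mod_mul_alt, PySem.List.len_eq]
    rw [pvFillA, pvFillB (hn1 := hn1')]
    rw [if_pos ⟨by exact_mod_cast hn1, by exact_mod_cast hn2⟩]
    set ℓ := p1.length + p2.length - 1 with hℓ
    have hcast : ((p1.length:Int) + (p2.length:Int) - 1).toNat = ℓ := by omega
    rw [hcast]
    have hlenA : ((pvPairsA p1 p2 r).foldl (pvStep m1) (List.replicate ℓ 0)).length = ℓ := by
      rw [pvFoldl_pvStep_length, List.length_replicate]
    rw [pvTrim, hlenA, PySem.List.length_pyRange_one]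
    set M := min ℓ r with hM
    have hMcast : (min ((p1.length:Int) + (p2.length:Int) - 1) ((r:Int))).toNat = M := by omega
    have htake : ℓ - (((ℓ:Int)) - ((r:Int))).toNat = M := by omega
    rw [hMcast, htake]
    -- elementwise comparison of the two bucket folds
    apply List.ext_getElem
    · rw [List.length_take, hlenA, pvFoldl_pvStep_length, List.length_replicate]
      omega
    · intro b hb1 hb2
      rw [List.length_take, hlenA] at hb1
      have hbM : b < M := by omega
      have hbr : b < r := by omega
      have hbℓ : b < ℓ := by omega
      rw [List.getElem_take]
      have hgdA : ((pvPairsA p1 p2 r).foldl (pvStep m1) (List.replicate ℓ 0))[b] =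
          ((pvPairsA p1 p2 r).foldl (pvStep m1) (List.replicate ℓ 0)).getD b 0 := by
        rw [List.getD_eq_getElem?_getD, List.getElem?_eq_getElem (by rw [hlenA]; omega)]
        rfl
      have hgdB : ((pvPairsB p1 p2 r).foldl (pvStep m1) (List.replicate M 0))[b] =
          ((pvPairsB p1 p2 r).foldl (pvStep m1) (List.replicate M 0)).getD b 0 := by
        rw [List.getD_eq_getElem?_getD, List.getElem?_eq_getElem]
        rfl
      rw [hgdA, hgdB]
      rw [pvBucket m1 _ _ b (by intro p hp; rw [List.length_replicate]; exact pvPairsA_lt p1 p2 r p hp),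
          pvBucket m1 _ _ b (by intro p hp; rw [List.length_replicate]
                                exact lt_of_lt_of_le (pvPairsB_lt p1 p2 r hr p hp) (le_of_eq hM.symm))]
      rw [if_neg (pvHitA p1 p2 r b hn1' hn2' hbr hbℓ), if_neg (pvHitB p1 p2 r b hbr hbℓ)]
      rw [pvReplicate_getD, pvReplicate_getD, pvSumA, pvSumB, pvSumBS]
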